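-- pv_equiv track=rewrite | github.com/LOCOSP/pineapple_pager_wdgwars | wdgwars/storage/session.py | _csv_escape
-- ===== SOURCE A (Python) =====
-- def _csv_escape(value: str) -> str:
--     """Escape commas/quotes/newlines per CSV. Wigle accepts double-quote-wrapped fields."""
--     if value is None:
--         return ""
--     needs_quote = any(c in value for c in (",", '"', "\n", "\r"))
--     cleaned = value.replace("\r", " ").replace("\n", " ")
--     if needs_quote:
--         return '"' + cleaned.replace('"', '""') + '"'
--     return cleaned
-- ===== SOURCE B (Python) =====
-- def _csv_escape(value: str) -> str:
--     """Single pass: build the cleaned body and detect the need for quoting at once."""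
--     if value is None:
--         return ""
--     needs_quote = False
--     parts = []
--     for c in value:
--         if c == "\r" or c == "\n":
--             parts.append(" ")
--             needs_quote = True
--         elif c == '"':
--             parts.append('""')
--             needs_quote = True
--         elif c == ",":
--             parts.append(c)
--             needs_quote = True
--         else:
--             parts.append(c)
--     body = "".join(parts)
--     if needs_quote:
--         return '"' + body + '"'
--     return body
-- ===== Notes on version B (the rewrite author's own statement) =====
-- stated objective: alternative
-- what changed: Replaced the any()-membership scan plus three chained .replace() passes with one character-by-character pass that builds the cleaned body and sets needs_quote simultaneously.
import Mathlib
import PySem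

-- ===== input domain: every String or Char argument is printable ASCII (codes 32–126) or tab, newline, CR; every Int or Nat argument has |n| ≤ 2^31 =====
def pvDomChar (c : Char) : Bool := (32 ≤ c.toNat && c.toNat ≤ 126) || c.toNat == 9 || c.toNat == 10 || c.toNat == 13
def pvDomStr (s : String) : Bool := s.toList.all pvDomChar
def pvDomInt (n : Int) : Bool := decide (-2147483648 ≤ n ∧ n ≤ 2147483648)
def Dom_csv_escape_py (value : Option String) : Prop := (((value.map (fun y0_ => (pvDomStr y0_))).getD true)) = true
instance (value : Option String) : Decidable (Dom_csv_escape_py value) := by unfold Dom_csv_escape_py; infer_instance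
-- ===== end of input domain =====

-- B replaces A's any()-membership scan plus chained .replace() passes with one character-by-character
-- pass that builds the escaped body and detects the need for quoting simultaneously (alternative).


-- ===== PORT A =====
def csv_escape_py (value : Option String) : String :=
  match value with
  | none => ""
  | some v =>
    let needs_quote := [",", "\"", "\n", "\r"].any (fun c => PySem.Str.isIn c v)
    let cleaned := PySem.Str.replace (PySem.Str.replace v "\r" " ") "\n" " "
    if needs_quote then "\"" ++ PySem.Str.replace cleaned "\"" "\"\"" ++ "\""
    else cleaned

-- ===== PORT B =====
-- one pass: accumulate the escaped body and the needs_quote flag together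
def csvEscapeGo : List Char → List Char → Bool → (List Char × Bool)
  | [], acc, nq => (acc, nq)
  | c :: rest, acc, nq =>
    if c = '\r' ∨ c = '\n' then csvEscapeGo rest (acc ++ [' ']) true
    else if c = '"' then csvEscapeGo rest (acc ++ ['"', '"']) true
    else if c = ',' then csvEscapeGo rest (acc ++ [c]) true
    else csvEscapeGo rest (acc ++ [c]) nq

def csv_escape_py_alt (value : Option String) : String :=
  match value with
  | none => ""
  | some s =>
    let r := csvEscapeGo s.toList [] false
    if r.2 then String.ofList ('"' :: (r.1 ++ ['"'])) else String.ofList r.1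

-- ===== PRECONDITION & SPEC =====
def Spec_csv_escape_py (value : Option String) (out : String) : Prop := out = csv_escape_py_alt value
instance (value : Option String) (out : String) : Decidable (Spec_csv_escape_py value out) := by unfold Spec_csv_escape_py; infer_instance

-- ===== CLAIM (what is proved, stated in full; the proofs are below) =====
def Claim_equal_csv_escape_py : Prop := ∀ (value : Option String), Dom_csv_escape_py value → Spec_csv_escape_py value (csv_escape_py value)

-- ===== LEMMAS AND PROOFS =====

-- the per-character escape both sides compute, and A's intermediate clean step
def csvPiece (c : Char) : List Char :=
  if c = '\r' ∨ c = '\n' then [' '] else if c = '"' then ['"', '"'] else [c]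

def csvClean (c : Char) : List Char :=
  if c = '\r' ∨ c = '\n' then [' '] else [c]

def csvHot (c : Char) : Bool := c = ',' ∨ c = '"' ∨ c = '\n' ∨ c = '\r'

lemma replace_go_single (o : Char) (n : List Char) :
    ∀ (l acc : List Char),
      PySem.Chars.replace.go [o] n l.length l acc
        = acc.reverse ++ l.flatMap (fun c => if c = o then n else [c]) := by
  intro l
  induction l with
  | nil => intro acc; simp [PySem.Chars.replace.go]
  | cons c t ih =>
    intro acc
    simp only [List.length_cons, PySem.Chars.replace.go, List.isPrefixOf]
    by_cases h : c = o
    · subst h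
      simp [ih, List.flatMap_cons]
    · simp [Ne.symm h, h, ih, List.flatMap_cons]

lemma replace_single (s : List Char) (o : Char) (n : List Char) :
    PySem.Chars.replace s [o] n = s.flatMap (fun c => if c = o then n else [c]) := by
  simp [PySem.Chars.replace, replace_go_single]

lemma csvEscapeGo_spec : ∀ (l acc : List Char) (nq : Bool),
    csvEscapeGo l acc nq = (acc ++ l.flatMap csvPiece, nq || l.any csvHot) := by
  intro l
  induction l with
  | nil => intro acc nq; simp [csvEscapeGo]
  | cons c t ih =>
    intro acc nq
    by_cases h1 : c = '\r' ∨ c = '\n'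
    · simp [csvEscapeGo, h1, ih, csvPiece, csvHot]
      rcases h1 with h | h <;> simp [h]
    · by_cases h2 : c = '"'
      · simp [csvEscapeGo, h2, ih, csvPiece, csvHot]
      · by_cases h3 : c = ','
        · simp [csvEscapeGo, h3, ih, csvPiece, csvHot]
        · have hhot : csvHot c = false := by
            simp only [csvHot]
            push_neg at h1
            simp [h3, h2, h1.1, h1.2]
          simp [csvEscapeGo, h1, h2, h3, ih, csvPiece, hhot]

lemma singleton_infix_iff (a : Char) (l : List Char) : [a] <:+: l ↔ a ∈ l := by
  constructor
  · intro h; exact h.mem (List.mem_singleton_self a)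
  · intro h
    obtain ⟨s, t, rfl⟩ := List.append_of_mem h
    exact ⟨s, t, by simp⟩

lemma needs_quote_eq (L : List Char) :
    (PySem.Chars.isIn [','] L || (PySem.Chars.isIn ['"'] L ||
      (PySem.Chars.isIn ['\n'] L || PySem.Chars.isIn ['\r'] L))) = L.any csvHot := by
  rw [Bool.eq_iff_iff]
  simp only [Bool.or_eq_true, PySem.Chars.isIn_iff_infix, singleton_infix_iff,
    List.any_eq_true]
  constructor
  · rintro (h | h | h | h) <;> exact ⟨_, h, by simp [csvHot]⟩
  · rintro ⟨x, hx, hhot⟩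
    simp only [csvHot, decide_eq_true_eq] at hhot
    rcases hhot with rfl | rfl | rfl | rfl
    · exact Or.inl hx
    · exact Or.inr (Or.inl hx)
    · exact Or.inr (Or.inr (Or.inl hx))
    · exact Or.inr (Or.inr (Or.inr hx))

-- A's two newline-cleaning replace passes collapse to one flatMap
lemma cleaned_flatMap (L : List Char) :
    PySem.Chars.replace (PySem.Chars.replace L ['\r'] [' ']) ['\n'] [' ']
      = L.flatMap csvClean := by
  rw [replace_single, replace_single, List.flatMap_assoc]
  congr 1
  funext c
  by_cases h1 : c = '\r'
  · simp [h1, csvClean]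
  · by_cases h2 : c = '\n' <;> simp [h1, h2, csvClean]

-- quote-doubling after cleaning equals the single-pass piece function
lemma doubled_flatMap (L : List Char) :
    PySem.Chars.replace (L.flatMap csvClean) ['"'] ['"', '"'] = L.flatMap csvPiece := by
  rw [replace_single, List.flatMap_assoc]
  congr 1
  funext c
  by_cases h1 : c = '\r' ∨ c = '\n'
  · simp [h1, csvClean, csvPiece]
  · by_cases h2 : c = '"' <;> simp [h1, h2, csvClean, csvPiece]

-- with no quote character present, cleaning and the piece function agree
lemma no_quote_flatMap : ∀ (L : List Char), L.any csvHot = false →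
    L.flatMap csvClean = L.flatMap csvPiece := by
  intro L
  induction L with
  | nil => intro _; rfl
  | cons c t ih =>
    intro h
    simp only [List.any_cons, Bool.or_eq_false_iff] at h
    have hc : csvHot c = false := h.1
    simp only [csvHot, decide_eq_false_iff_not] at hc
    push_neg at hc
    simp [List.flatMap_cons, ih h.2, csvClean, csvPiece, hc.2.2.1, hc.2.2.2, hc.2.1]

-- ===== VERDICT (by name: the statement is the Claim_ definition above) =====
theorem csv_escape_py_spec : Claim_equal_csv_escape_py := by
  intro value _
  unfold Spec_csv_escape_py
  match value with
  | none => rfl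
  | some s =>
    simp only [csv_escape_py, csv_escape_py_alt, csvEscapeGo_spec, List.nil_append,
      Bool.false_or, List.any_cons, List.any_nil, Bool.or_false, PySem.Str.isIn,
      PySem.Str.replace, String.toList_ofList]
    have htl : (",".toList, "\"".toList, "\n".toList, "\r".toList, " ".toList, "\"\"".toList)
        = ([','], ['"'], ['\n'], ['\r'], [' '], ['"', '"']) := by decide
    simp only [Prod.mk.injEq] at htl
    rw [htl.1, htl.2.1, htl.2.2.1, htl.2.2.2.1, htl.2.2.2.2.1, htl.2.2.2.2.2]
    rw [needs_quote_eq, cleaned_flatMap]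
    by_cases hq : s.toList.any csvHot = true
    · simp only [hq, if_true]
      rw [doubled_flatMap]
      apply String.toList_inj.mp
      simp
    · simp only [Bool.not_eq_true] at hq
      rw [if_neg (by simp [hq]), if_neg (by simp [hq])]
      rw [no_quote_flatMap _ hq]
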